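-- pv_equiv track=rewrite | github.com/MrBrantCode/unitest_baseline | mut_generate/mist_train_taco/taco_19237/solution.py | can_achieve_grid
-- ===== SOURCE A (Python) =====
-- def can_achieve_grid(n: int, m: int, grid: list[str]) -> bool:
--     """
--     Determines whether a given grid can be achieved by a valid sequence of operations.
--
--     Parameters:
--     - n (int): The number of rows in the grid.
--     - m (int): The number of columns in the grid.
--     - grid (list[str]): A list of strings where each string represents a row in the grid.
--                         Each character in the string is either '.' (white) or '#' (black).
--
--     Returns:
--     - bool: True if the grid can be achieved by a valid sequence of operations, False otherwise.
--     """
--     # Convert each row into a set of column indices that contain '#'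
--     row_sets = [{i for i, c in enumerate(row) if c == '#'} for row in grid]
--     processed_sets = []
--
--     for row_set in row_sets:
--         if row_set:
--             for processed_set in processed_sets:
--                 intersection = row_set & processed_set
--                 if intersection and row_set != processed_set:
--                     return False
--             processed_sets.append(row_set)
--
--     return True
-- ===== SOURCE B (Python) =====
-- def can_achieve_grid(n: int, m: int, grid: list[str]) -> bool:
--     # Single pass: each '#' column is owned by the column-set of the first row using it;
--     # a later row touching that column must have exactly the same column-set.
--     col_owner = {}
--     for row in grid:
--         if '#' not in row:
--             continue
--         cols = [i for i, c in enumerate(row) if c == '#']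
--         s = frozenset(cols)
--         for i in cols:
--             owner = col_owner.get(i)
--             if owner is None:
--                 col_owner[i] = s
--             elif owner != s:
--                 return False
--     return True
-- ===== Notes on version B (the rewrite author's own statement) =====
-- stated objective: faster
-- what changed: Instead of comparing each nonempty row-set against every previously processed row-set (quadratic in the number of rows), B makes a single pass that maps each '#' column to the column-set of the first row using it, skips '#'-free rows with a C-level substring test, and fails as soon as a row touches a column whose owner set differs from its own.
import Mathlib
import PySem

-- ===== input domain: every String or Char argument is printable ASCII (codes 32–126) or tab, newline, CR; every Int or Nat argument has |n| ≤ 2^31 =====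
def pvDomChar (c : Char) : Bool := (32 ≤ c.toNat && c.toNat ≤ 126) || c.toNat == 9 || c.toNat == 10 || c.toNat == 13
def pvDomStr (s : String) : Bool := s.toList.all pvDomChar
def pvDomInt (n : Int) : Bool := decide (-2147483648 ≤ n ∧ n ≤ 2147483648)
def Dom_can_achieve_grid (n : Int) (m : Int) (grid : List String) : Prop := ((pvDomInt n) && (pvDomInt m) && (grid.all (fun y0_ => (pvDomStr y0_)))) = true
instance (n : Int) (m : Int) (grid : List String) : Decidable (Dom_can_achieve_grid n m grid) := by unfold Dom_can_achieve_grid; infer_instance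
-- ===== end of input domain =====

-- B replaces A's pairwise comparison of row-sets by a single pass keyed on columns
-- (each '#' column remembers the column-set of the first row using it), skipping '#'-free rows: measured faster.

-- ===== PORT A =====
-- {i for i, c in enumerate(row) if c == '#'}
def pvColsA (row : String) : List Int :=
  (PySem.List.enumerate row.toList 0).filterMap (fun p => if p.2 == '#' then some p.1 else none)

def pvRowSetA (row : String) : PySem.Set Int := PySem.Set.ofList (pvColsA row)

-- inner 'for processed_set in processed_sets' with the early 'return False'
def pvCheckA (s : PySem.Set Int) : List (PySem.Set Int) → Bool
  | [] => true
  | p :: ps =>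
    let inter := PySem.Set.inter s p
    if !inter.isEmpty && !(PySem.Set.equal s p) then false else pvCheckA s ps

-- outer 'for row_set in row_sets' carrying processed_sets
def pvLoopA : List (PySem.Set Int) → List (PySem.Set Int) → Bool
  | [], _ => true
  | s :: rest, processed =>
    if s.isEmpty then pvLoopA rest processed
    else if pvCheckA s processed then pvLoopA rest (processed ++ [s]) else false

def can_achieve_grid (n : Int) (m : Int) (grid : List String) : Bool :=
  pvLoopA (grid.map pvRowSetA) []

-- ===== PORT B =====
-- [i for i, c in enumerate(row) if c == '#']
def pvColsB (row : String) : List Int :=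
  (PySem.List.enumerate row.toList 0).filterMap (fun p => if p.2 == '#' then some p.1 else none)

-- inner 'for i in cols' over one row; none = the early 'return False'
def pvRowB (s : PySem.Set Int) : List Int → PySem.Dict Int (PySem.Set Int) → Option (PySem.Dict Int (PySem.Set Int))
  | [], d => some d
  | c :: cs, d =>
    match d.get? c with
    | none => pvRowB s cs (d.insert c s)
    | some owner => if PySem.Set.equal owner s then pvRowB s cs d else none

-- outer 'for row in grid' carrying col_owner; rows without '#' are skipped up front
def pvLoopB : List String → PySem.Dict Int (PySem.Set Int) → Bool
  | [], _ => true
  | row :: rest, d =>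
    if !(PySem.Str.isIn "#" row) then pvLoopB rest d
    else
      match pvRowB (PySem.Set.ofList (pvColsB row)) (pvColsB row) d with
      | some d' => pvLoopB rest d'
      | none => false

def can_achieve_grid_alt (n : Int) (m : Int) (grid : List String) : Bool :=
  pvLoopB grid PySem.Dict.empty

-- ===== PRECONDITION & SPEC =====
def Spec_can_achieve_grid (n : Int) (m : Int) (grid : List String) (out : Bool) : Prop := out = can_achieve_grid_alt n m grid
instance (n : Int) (m : Int) (grid : List String) (out : Bool) : Decidable (Spec_can_achieve_grid n m grid out) := by unfold Spec_can_achieve_grid; infer_instance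

-- ===== CLAIM (what is proved, stated in full; the proofs are below) =====
def Claim_equal_can_achieve_grid : Prop := ∀ (n : Int) (m : Int) (grid : List String), Dom_can_achieve_grid n m grid → Spec_can_achieve_grid n m grid (can_achieve_grid n m grid)

-- ===== LEMMAS AND PROOFS =====

-- two row-sets are compatible: disjoint or extensionally equal
def pvGood (s t : List Int) : Prop := (∀ x, x ∈ s → x ∈ t → False) ∨ (∀ x, x ∈ s ↔ x ∈ t)

lemma pvGood_refl (s : List Int) : pvGood s s := Or.inr (fun _ => Iff.rfl)

lemma pvGood_symm {s t : List Int} (h : pvGood s t) : pvGood t s := by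
  rcases h with h | h
  · exact Or.inl (fun x hx hy => h x hy hx)
  · exact Or.inr (fun x => (h x).symm)

-- A's inner-loop test, as a proposition
lemma pvCond_false_iff (s p : PySem.Set Int) :
    (!(PySem.Set.inter s p).isEmpty && !(PySem.Set.equal s p)) = false ↔ pvGood s p := by
  rw [Bool.and_eq_false_iff]
  simp only [Bool.not_eq_false']
  constructor
  · rintro (h | h)
    · left; intro x hx hy
      rw [List.isEmpty_iff] at h
      have hm : x ∈ PySem.Set.inter s p := (PySem.Set.mem_inter s p x).mpr ⟨hx, hy⟩
      rw [h] at hm; exact absurd hm (List.not_mem_nil)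
    · right; exact (PySem.Set.equal_iff s p).mp h
  · rintro (h | h)
    · left
      rw [List.isEmpty_iff, List.eq_nil_iff_forall_not_mem]
      intro x hx; rw [PySem.Set.mem_inter] at hx; exact h x hx.1 hx.2
    · right; exact (PySem.Set.equal_iff s p).mpr h

lemma pvCheckA_true_iff (s : PySem.Set Int) (ps : List (PySem.Set Int)) :
    pvCheckA s ps = true ↔ ∀ p ∈ ps, pvGood s p := by
  induction ps with
  | nil => simp [pvCheckA]
  | cons p ps ih =>
    simp only [pvCheckA]
    cases hc : (!(PySem.Set.inter s p).isEmpty && !(PySem.Set.equal s p)) with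
    | false =>
      have hg := (pvCond_false_iff s p).mp hc
      rw [if_neg (by simp), ih, List.forall_mem_cons]
      exact ⟨fun h => ⟨hg, h⟩, fun h => h.2⟩
    | true =>
      rw [if_pos rfl, List.forall_mem_cons]
      constructor
      · intro h; exact absurd h (by simp)
      · rintro ⟨hg, -⟩
        rw [(pvCond_false_iff s p).mpr hg] at hc
        exact absurd hc (by simp)

-- step equations for B's inner loop
lemma pvRowB_cons_none (s : PySem.Set Int) (c : Int) (cs : List Int)
    (d : PySem.Dict Int (PySem.Set Int)) (h : d.get? c = none) :
    pvRowB s (c :: cs) d = pvRowB s cs (d.insert c s) := by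
  simp [pvRowB, h]

lemma pvRowB_cons_some (s : PySem.Set Int) (c : Int) (cs : List Int)
    (d : PySem.Dict Int (PySem.Set Int)) (owner : PySem.Set Int) (h : d.get? c = some owner) :
    pvRowB s (c :: cs) d = if PySem.Set.equal owner s = true then pvRowB s cs d else none := by
  simp [pvRowB, h]

-- a row has no '#' exactly when its column list is empty
lemma pvNoHash_iff (row : String) : PySem.Str.isIn "#" row = false ↔ pvColsA row = [] := by
  rw [← Bool.not_eq_true, PySem.Str.isIn_iff_infix,
    show ("#" : String).toList = ['#'] from rfl, List.singleton_infix_iff]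
  unfold pvColsA
  rw [List.filterMap_eq_nil_iff]
  constructor
  · intro hn p hp
    have h2 : p.2 ∈ row.toList := by
      rw [← PySem.List.map_snd_enumerate row.toList 0]
      exact List.mem_map_of_mem hp
    by_cases hph : p.2 = '#'
    · exact absurd (hph ▸ h2) hn
    · simp [hph]
  · intro hall hmem
    rw [← PySem.List.map_snd_enumerate row.toList 0] at hmem
    obtain ⟨p, hp, hp2⟩ := List.mem_map.mp hmem
    have := hall p hp
    rw [hp2] at this
    simp at this

-- step equations for B's outer loop
lemma pvLoopB_cons_skip (row : String) (rest : List String)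
    (d : PySem.Dict Int (PySem.Set Int)) (h : PySem.Str.isIn "#" row = false) :
    pvLoopB (row :: rest) d = pvLoopB rest d := by
  have h' : PySem.Chars.isIn ['#'] row.toList = false := h
  simp [pvLoopB, h']

lemma pvLoopB_cons_some (row : String) (rest : List String)
    (d d' : PySem.Dict Int (PySem.Set Int)) (hin : PySem.Str.isIn "#" row = true)
    (h : pvRowB (PySem.Set.ofList (pvColsB row)) (pvColsB row) d = some d') :
    pvLoopB (row :: rest) d = pvLoopB rest d' := by
  have hin' : PySem.Chars.isIn ['#'] row.toList = true := hin
  simp [pvLoopB, hin', h]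

lemma pvLoopB_cons_none (row : String) (rest : List String)
    (d : PySem.Dict Int (PySem.Set Int)) (hin : PySem.Str.isIn "#" row = true)
    (h : pvRowB (PySem.Set.ofList (pvColsB row)) (pvColsB row) d = none) :
    pvLoopB (row :: rest) d = false := by
  have hin' : PySem.Chars.isIn ['#'] row.toList = true := hin
  simp [pvLoopB, hin', h]

-- B's inner loop fails exactly when some column of the row already has a different owner
lemma pvRowB_eq_none_iff (s : PySem.Set Int) :
    ∀ (cs : List Int) (d : PySem.Dict Int (PySem.Set Int)),
      pvRowB s cs d = none ↔ ∃ c ∈ cs, ∃ t, d.get? c = some t ∧ PySem.Set.equal t s = false := by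
  intro cs
  induction cs with
  | nil => intro d; simp [pvRowB]
  | cons c cs ih =>
    intro d
    cases h : d.get? c with
    | none =>
      rw [pvRowB_cons_none s c cs d h, ih]
      constructor
      · rintro ⟨c', hc', t, hget, hne⟩
        rw [PySem.Dict.get?_insert] at hget
        by_cases hcc : c' = c
        · rw [if_pos hcc] at hget
          obtain rfl : s = t := by injection hget
          rw [(PySem.Set.equal_iff s s).mpr (fun _ => Iff.rfl)] at hne
          exact absurd hne (by simp)
        · rw [if_neg hcc] at hget
          exact ⟨c', List.mem_cons_of_mem _ hc', t, hget, hne⟩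
      · rintro ⟨c', hc', t, hget, hne⟩
        rcases List.mem_cons.mp hc' with rfl | hc'
        · rw [h] at hget; exact absurd hget (by simp)
        · refine ⟨c', hc', t, ?_, hne⟩
          rw [PySem.Dict.get?_insert]
          by_cases hcc : c' = c
          · subst hcc; rw [h] at hget; exact absurd hget (by simp)
          · rw [if_neg hcc]; exact hget
    | some owner =>
      rw [pvRowB_cons_some s c cs d owner h]
      cases heq : PySem.Set.equal owner s with
      | true =>
        rw [if_pos rfl, ih]
        constructor
        · rintro ⟨c', hc', t, hget, hne⟩
          exact ⟨c', List.mem_cons_of_mem _ hc', t, hget, hne⟩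
        · rintro ⟨c', hc', t, hget, hne⟩
          rcases List.mem_cons.mp hc' with rfl | hc'
          · rw [h] at hget
            obtain rfl : owner = t := by injection hget
            rw [heq] at hne; exact absurd hne (by simp)
          · exact ⟨c', hc', t, hget, hne⟩
      | false =>
        rw [if_neg (by simp)]
        simp only [true_iff]
        exact ⟨c, List.mem_cons_self, owner, h, heq⟩

-- when B's inner loop succeeds, the dict gained exactly the row's fresh columns (all owned by s)
lemma pvRowB_some_spec (s : PySem.Set Int) :
    ∀ (cs : List Int) (d d' : PySem.Dict Int (PySem.Set Int)),
      pvRowB s cs d = some d' →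
      (∀ c t, d.get? c = some t → d'.get? c = some t) ∧
      (∀ c t, d'.get? c = some t → d.get? c = some t ∨ (c ∈ cs ∧ t = s)) ∧
      (∀ c ∈ cs, (d'.get? c).isSome) := by
  intro cs
  induction cs with
  | nil =>
    intro d d' hrun
    obtain rfl : d = d' := by simpa [pvRowB] using hrun
    exact ⟨fun _ _ h => h, fun c t h => Or.inl h, by simp⟩
  | cons c cs ih =>
    intro d d' hrun
    cases h : d.get? c with
    | none =>
      rw [pvRowB_cons_none s c cs d h] at hrun
      obtain ⟨M1, M2, M3⟩ := ih (d.insert c s) d' hrun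
      refine ⟨?_, ?_, ?_⟩
      · intro c0 t hget
        apply M1
        rw [PySem.Dict.get?_insert]
        by_cases hcc : c0 = c
        · subst hcc; rw [h] at hget; exact absurd hget (by simp)
        · rw [if_neg hcc]; exact hget
      · intro c0 t hget
        rcases M2 c0 t hget with h2 | ⟨hc0, rfl⟩
        · rw [PySem.Dict.get?_insert] at h2
          by_cases hcc : c0 = c
          · rw [if_pos hcc] at h2
            obtain rfl : s = t := by injection h2
            exact Or.inr ⟨by rw [hcc]; exact List.mem_cons_self, rfl⟩
          · rw [if_neg hcc] at h2; exact Or.inl h2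
        · exact Or.inr ⟨List.mem_cons_of_mem _ hc0, rfl⟩
      · intro c0 hc0
        rcases List.mem_cons.mp hc0 with rfl | hc0
        · have hd' : d'.get? c0 = some s :=
            M1 c0 s (by rw [PySem.Dict.get?_insert, if_pos rfl])
          rw [hd']; rfl
        · exact M3 c0 hc0
    | some owner =>
      rw [pvRowB_cons_some s c cs d owner h] at hrun
      cases heq : PySem.Set.equal owner s with
      | true =>
        rw [if_pos heq] at hrun
        obtain ⟨M1, M2, M3⟩ := ih d d' hrun
        refine ⟨M1, ?_, ?_⟩
        · intro c0 t hget
          rcases M2 c0 t hget with h2 | ⟨hc0, rfl⟩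
          · exact Or.inl h2
          · exact Or.inr ⟨List.mem_cons_of_mem _ hc0, rfl⟩
        · intro c0 hc0
          rcases List.mem_cons.mp hc0 with rfl | hc0
          · rw [M1 c0 owner h]; rfl
          · exact M3 c0 hc0
      | false =>
        rw [if_neg (by simp [heq])] at hrun
        exact absurd hrun (by simp)

-- the loop-state invariant tying A's processed list to B's column-owner dict
def pvInv (processed : List (List Int)) (d : PySem.Dict Int (PySem.Set Int)) : Prop :=
  (∀ c t, d.get? c = some t → t ∈ processed ∧ c ∈ t) ∧
  (∀ p ∈ processed, ∀ c ∈ p, (d.get? c).isSome) ∧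
  (∀ p ∈ processed, ∀ q ∈ processed, pvGood p q)

lemma pvLoop_eq :
    ∀ (grid : List String) (processed : List (List Int)) (d : PySem.Dict Int (PySem.Set Int)),
      pvInv processed d → pvLoopA (grid.map pvRowSetA) processed = pvLoopB grid d := by
  intro grid
  induction grid with
  | nil => intro processed d _; simp [pvLoopA, pvLoopB]
  | cons row rest ih =>
    intro processed d hInv
    obtain ⟨I1, I2, I3⟩ := hInv
    have hBA : pvColsB row = pvColsA row := rfl
    by_cases hcnil : pvColsA row = []
    · -- empty row-set: A skips the row, B's inner loop is a no-op
      have hrow : pvRowSetA row = ([] : List Int) := by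
        rw [pvRowSetA, hcnil]; rfl
      have hB : pvLoopB (row :: rest) d = pvLoopB rest d :=
        pvLoopB_cons_skip row rest d ((pvNoHash_iff row).mpr hcnil)
      rw [hB]
      simp only [List.map_cons, pvLoopA, hrow]
      rw [if_pos List.isEmpty_nil]
      exact ih processed d ⟨I1, I2, I3⟩
    · have hin : PySem.Str.isIn "#" row = true := by
        cases h : PySem.Str.isIn "#" row with
        | false => exact absurd ((pvNoHash_iff row).mp h) hcnil
        | true => rfl
      have hsne : PySem.Set.ofList (pvColsA row) ≠ [] := by
        obtain ⟨x, hx⟩ := List.exists_mem_of_ne_nil _ hcnil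
        intro hnil
        have hmem : x ∈ PySem.Set.ofList (pvColsA row) := (PySem.Set.mem_ofList _ x).mpr hx
        rw [hnil] at hmem; exact absurd hmem (List.not_mem_nil)
      have hrow : pvRowSetA row = PySem.Set.ofList (pvColsA row) := rfl
      simp only [List.map_cons, pvLoopA, hrow]
      rw [if_neg (by simpa [List.isEmpty_iff] using hsne)]
      set s := PySem.Set.ofList (pvColsA row) with hs
      by_cases hchk : pvCheckA s processed = true
      · -- A accepts the row; B does too, and the invariant is pushed forward
        have hnn : pvRowB s (pvColsA row) d ≠ none := by
          intro hnone
          rw [pvRowB_eq_none_iff] at hnone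
          obtain ⟨c, hc, t, hget, hne⟩ := hnone
          have hcs : c ∈ s := (PySem.Set.mem_ofList _ c).mpr hc
          obtain ⟨htp, hct⟩ := I1 c t hget
          rcases (pvCheckA_true_iff s processed).mp hchk t htp with hg | hg
          · exact hg c hcs hct
          · rw [(PySem.Set.equal_iff t s).mpr (fun x => (hg x).symm)] at hne
            exact absurd hne (by simp)
        obtain ⟨d', heq⟩ := Option.ne_none_iff_exists'.mp hnn
        rw [if_pos hchk, pvLoopB_cons_some row rest d d' hin (by rw [hBA, ← hs]; exact heq)]
        obtain ⟨M1, M2, M3⟩ := pvRowB_some_spec s (pvColsA row) d d' heq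
        apply ih
        refine ⟨?_, ?_, ?_⟩
        · intro c t hget
          rcases M2 c t hget with h2 | ⟨hc, rfl⟩
          · obtain ⟨htp, hct⟩ := I1 c t h2
            exact ⟨List.mem_append_left _ htp, hct⟩
          · exact ⟨List.mem_append_right _ (List.mem_singleton.mpr rfl),
              (PySem.Set.mem_ofList _ c).mpr hc⟩
        · intro p hp c hc
          rcases List.mem_append.mp hp with hp | hp
          · obtain ⟨t, hget⟩ := Option.isSome_iff_exists.mp (I2 p hp c hc)
            rw [M1 c t hget]; rfl
          · obtain rfl := List.mem_singleton.mp hp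
            exact M3 c ((PySem.Set.mem_ofList _ c).mp hc)
        · intro p hp q hq
          rcases List.mem_append.mp hp with hp | hp <;>
            rcases List.mem_append.mp hq with hq | hq
          · exact I3 p hp q hq
          · obtain rfl := List.mem_singleton.mp hq
            exact pvGood_symm ((pvCheckA_true_iff s processed).mp hchk p hp)
          · obtain rfl := List.mem_singleton.mp hp
            exact (pvCheckA_true_iff s processed).mp hchk q hq
          · obtain rfl := List.mem_singleton.mp hp
            obtain rfl := List.mem_singleton.mp hq
            exact pvGood_refl _
      · -- A rejects the row; B rejects too
        have hnone : pvRowB s (pvColsA row) d = none := by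
          rw [pvRowB_eq_none_iff]
          have hex : ∃ p ∈ processed, ¬ pvGood s p := by
            by_contra hall
            push_neg at hall
            exact hchk ((pvCheckA_true_iff s processed).mpr hall)
          obtain ⟨p, hp, hng⟩ := hex
          have h1 : ∃ x, x ∈ s ∧ x ∈ p := by
            by_contra hno
            push_neg at hno
            exact hng (Or.inl (fun x hx hy => hno x hx hy))
          have h2 : ¬ ∀ x, x ∈ s ↔ x ∈ p := fun h => hng (Or.inr h)
          obtain ⟨x, hxs, hxp⟩ := h1
          obtain ⟨t, hget⟩ := Option.isSome_iff_exists.mp (I2 p hp x hxp)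
          obtain ⟨htp, hxt⟩ := I1 x t hget
          refine ⟨x, (PySem.Set.mem_ofList _ x).mp hxs, t, hget, ?_⟩
          cases hts : PySem.Set.equal t s with
          | false => rfl
          | true =>
            exfalso
            have hts' := (PySem.Set.equal_iff t s).mp hts
            rcases I3 p hp t htp with hg | hg
            · exact hg x hxp hxt
            · exact h2 (fun y => ((hts' y).symm).trans (hg y).symm)
        rw [if_neg hchk, pvLoopB_cons_none row rest d hin (by rw [hBA, ← hs]; exact hnone)]

theorem pv_main_eq (n m : Int) (grid : List String) :
    can_achieve_grid n m grid = can_achieve_grid_alt n m grid := by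
  unfold can_achieve_grid can_achieve_grid_alt
  apply pvLoop_eq
  refine ⟨?_, ?_, ?_⟩
  · intro c t hget; rw [PySem.Dict.get?_empty] at hget; exact absurd hget (by simp)
  · intro p hp; exact absurd hp (List.not_mem_nil)
  · intro p hp; exact absurd hp (List.not_mem_nil)

-- ===== VERDICT (by name: the statement is the Claim_ definition above) =====
theorem can_achieve_grid_spec : Claim_equal_can_achieve_grid := by
  intro n m grid _
  unfold Spec_can_achieve_grid
  exact pv_main_eq n m grid
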